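-- pv_equiv track=rewrite | github.com/JaeHyeok-Han/Algorithm | PROGRAMMERS/할인 행사.py | solution
-- ===== SOURCE A (Python) =====
-- def solution(want, number, discount):
--     answer = 0
--     target = {}
--     for i, obj in enumerate(want):
--         target[obj] = number[i]
--     check = {}
--     for i, obj in enumerate(discount):
--         if obj in check:
--             check[obj] += 1
--         else:
--             check[obj] = 1
--         if i >= 10:
--             n = discount[i - 10]
--             check[n] -= 1
--             if check[n] == 0:
--                 del check[n]
--         if check == target:
--             answer += 1
--
--     return answer
-- ===== SOURCE B (Python) =====
-- def solution(want, number, discount):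
--     target = {}
--     for w, n in zip(want, number):
--         target[w] = n
--     answer = 0
--     for i in range(len(discount)):
--         window = discount[max(0, i - 9):i + 1]
--         cnt = {}
--         for x in window:
--             cnt[x] = cnt.get(x, 0) + 1
--         if cnt == target:
--             answer += 1
--     return answer
-- ===== Notes on version B (the rewrite author's own statement) =====
-- stated objective: simpler
-- what changed: B replaces A's incremental sliding-window dict (add the new day, decrement and possibly delete the day falling out) by recomputing each window's counts independently from the slice discount[max(0,i-9):i+1] and comparing that fresh counter to target.
-- outside the precondition, e.g. on solution(['a', 'b'], [1], ['a']): A raises IndexError, B returns 1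
import Mathlib
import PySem

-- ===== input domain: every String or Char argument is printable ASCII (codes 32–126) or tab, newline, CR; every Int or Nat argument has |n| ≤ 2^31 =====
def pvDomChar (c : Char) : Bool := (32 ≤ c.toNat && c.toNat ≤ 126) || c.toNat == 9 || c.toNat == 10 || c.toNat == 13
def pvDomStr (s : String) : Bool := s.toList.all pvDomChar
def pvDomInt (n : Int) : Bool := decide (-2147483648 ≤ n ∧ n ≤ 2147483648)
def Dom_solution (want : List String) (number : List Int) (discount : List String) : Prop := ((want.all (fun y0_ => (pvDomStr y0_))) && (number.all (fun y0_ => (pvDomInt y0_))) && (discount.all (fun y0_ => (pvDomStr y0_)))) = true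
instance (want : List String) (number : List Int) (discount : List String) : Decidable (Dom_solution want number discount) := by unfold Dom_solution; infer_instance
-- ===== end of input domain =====

-- B drops A's incremental add/evict window bookkeeping and instead recomputes each
-- 10-day window's counts independently from a slice (simpler decomposition, same results).

-- Python's `d1 == d2` on dicts compares the mappings, ignoring insertion order
-- (both ports use this shared helper for the one `==` both Pythons perform).
def pvDictEq (d e : PySem.Dict String Int) : Bool :=
  (d.keys.all (fun k => e.get? k == d.get? k)) && (e.keys.all (fun k => d.get? k == e.get? k))

-- ===== PORT A =====
-- one iteration of A's `for i, obj in enumerate(discount)` loop, state = (answer, check)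
def pvStepA (discount : List String) (target : PySem.Dict String Int)
    (st : Int × PySem.Dict String Int) (p : Int × String) : Int × PySem.Dict String Int :=
  let i := p.1
  let obj := p.2
  let c1 := if st.2.contains obj then st.2.modify obj 0 (· + 1) else st.2.insert obj 1
  let c2 :=
    if 10 ≤ i then
      let n := PySem.List.pyGetD discount (i - 10) ""   -- discount[i-10]; exact: 0 ≤ i-10 < len(discount) here
      let c' := c1.modify n 0 (· - 1)                    -- check[n] -= 1 (n is always present here)
      if c'.getD n 0 == 0 then c'.erase n else c'
    else c1
  (st.1 + (if pvDictEq c2 target then 1 else 0), c2)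

def solution (want : List String) (number : List Int) (discount : List String) : Int :=
  let target := (PySem.List.enumerate want 0).foldl
    (fun t p => t.insert p.2 (PySem.List.pyGetD number p.1 0)) PySem.Dict.empty
    -- number[i]; exact under Pre_ (i < len(number))
  ((PySem.List.enumerate discount 0).foldl (pvStepA discount target) (0, PySem.Dict.empty)).1

-- ===== PORT B =====
-- counts of the window discount[max(0, i-9) : i+1], built with cnt[x] = cnt.get(x, 0) + 1
def pvWindowCnt (discount : List String) (i : Nat) : PySem.Dict String Int :=
  (PySem.List.slice discount (some (max 0 ((i : Int) - 9))) (some ((i : Int) + 1))).foldl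
    (fun c x => c.insert x (c.getD x 0 + 1)) PySem.Dict.empty

def solution_alt (want : List String) (number : List Int) (discount : List String) : Int :=
  let target := (want.zip number).foldl (fun t p => t.insert p.1 p.2) PySem.Dict.empty
  (List.range discount.length).foldl
    (fun a i => a + (if pvDictEq (pvWindowCnt discount i) target then 1 else 0)) 0

-- ===== PRECONDITION & SPEC =====
-- A evaluates number[i] for every index i of want, so it raises IndexError when
-- want is longer than number; Pre_ keeps exactly the inputs where A returns.
def Pre_solution (want : List String) (number : List Int) (discount : List String) : Prop :=
  want.length ≤ number.length
instance (want : List String) (number : List Int) (discount : List String) : Decidable (Pre_solution want number discount) := by unfold Pre_solution; infer_instance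

def pvWitness_solution : List String × List Int × List String := (["a"], [2], ["a", "a"])

def Spec_solution (want : List String) (number : List Int) (discount : List String) (out : Int) : Prop := out = solution_alt want number discount
instance (want : List String) (number : List Int) (discount : List String) (out : Int) : Decidable (Spec_solution want number discount out) := by unfold Spec_solution; infer_instance

-- ===== CLAIM (what is proved, stated in full; the proofs are below) =====
def Claim_equal_solution : Prop := ∀ (want : List String) (number : List Int) (discount : List String), Dom_solution want number discount → Pre_solution want number discount → Spec_solution want number discount (solution want number discount)

-- ===== LEMMAS AND PROOFS =====

-- get? after modify (modify is an insert of the updated value)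
theorem pv_get?_modify (d : PySem.Dict String Int) (k k' : String) (d0 : Int) (f : Int → Int) :
    (d.modify k d0 f).get? k' = if k' = k then some (f (d.getD k d0)) else d.get? k' := by
  simp [PySem.Dict.modify, PySem.Dict.get?_insert]

-- get? after erase
theorem pv_find?_filter_ne (k k' : String) (l : List (String × Int)) (h : k' ≠ k) :
    List.find? (fun p => p.1 == k') (l.filter (fun p => !p.1 == k))
      = List.find? (fun p => p.1 == k') l := by
  induction l with
  | nil => rfl
  | cons p l ih =>
    by_cases hp : p.1 = k
    · rw [List.filter_cons_of_neg (by simp [hp]), ih,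
        List.find?_cons_of_neg (by simp [hp]; exact fun hc => h hc.symm)]
    · by_cases hp' : p.1 = k'
      · rw [List.filter_cons_of_pos (by simp [hp]),
          List.find?_cons_of_pos (by simp [hp']), List.find?_cons_of_pos (by simp [hp'])]
      · rw [List.filter_cons_of_pos (by simp [hp]),
          List.find?_cons_of_neg (by simp [hp']), List.find?_cons_of_neg (by simp [hp']), ih]

theorem pv_get?_erase (d : PySem.Dict String Int) (k k' : String) :
    (d.erase k).get? k' = if k' = k then none else d.get? k' := by
  rcases d with ⟨items⟩
  by_cases hk : k' = k
  · subst hk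
    rw [if_pos rfl]
    simp only [PySem.Dict.erase, PySem.Dict.get?]
    rw [List.find?_eq_none.mpr, Option.map_none]
    intro p hp
    have h2 := (List.mem_filter.mp hp).2
    simp only [Bool.not_eq_eq_eq_not, Bool.not_true, beq_eq_false_iff_ne, ne_eq] at h2
    simpa using h2
  · rw [if_neg hk]
    simp only [PySem.Dict.erase, PySem.Dict.get?]
    rw [pv_find?_filter_ne k k' items hk]

-- get? of a Counter, in terms of the multiplicity
theorem pv_get?_counter (l : List String) (k : String) :
    (PySem.Dict.counter l).get? k = if l.count k = 0 then none else some ((l.count k : Int)) := by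
  by_cases h : l.count k = 0
  · have hnm : k ∉ l := List.count_eq_zero.mp h
    have : (PySem.Dict.counter l).contains k = false := by
      rw [PySem.Dict.contains_counter]
      simpa using hnm
    simp [h, (PySem.Dict.get?_eq_none_iff_contains _ _).mpr this]
  · have hmem : k ∈ l := by
      by_contra hk
      exact h (List.count_eq_zero.mpr hk)
    have hc : (PySem.Dict.counter l).contains k = true := by
      rw [PySem.Dict.contains_counter]; simpa using hmem
    rcases hg : (PySem.Dict.counter l).get? k with _ | v
    · exact absurd ((PySem.Dict.get?_eq_none_iff_contains _ _).mp hg) (by simp [hc])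
    · have : (PySem.Dict.counter l).getD k 0 = v := PySem.Dict.getD_of_get?_eq_some _ 0 hg
      rw [PySem.Dict.getD_counter] at this
      simp [h, ← this]

-- Python dict equality depends only on the mapping, not the key order
theorem pvDictEq_congr (d d' e : PySem.Dict String Int)
    (h : ∀ k, d.get? k = d'.get? k) : pvDictEq d e = pvDictEq d' e := by
  have hmem : ∀ k, k ∈ d.keys ↔ k ∈ d'.keys := by
    intro k
    rw [← not_iff_not]
    rw [← PySem.Dict.get?_eq_none_iff_not_mem_keys, ← PySem.Dict.get?_eq_none_iff_not_mem_keys, h k]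
  rw [Bool.eq_iff_iff]
  simp only [pvDictEq, Bool.and_eq_true, List.all_eq_true, beq_iff_eq]
  constructor
  · rintro ⟨h1, h2⟩
    refine ⟨fun k hk => ?_, fun k hk => ?_⟩
    · rw [← h k]; exact h1 k ((hmem k).mpr hk)
    · rw [← h k]; exact h2 k hk
  · rintro ⟨h1, h2⟩
    refine ⟨fun k hk => ?_, fun k hk => ?_⟩
    · rw [h k]; exact h1 k ((hmem k).mp hk)
    · rw [h k]; exact h2 k hk

-- the two target-building loops coincide (A: enumerate + number[i]; B: zip)
theorem pv_target_eq (number : List Int) :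
    ∀ (w : List String) (s : Nat) (t : PySem.Dict String Int),
      s + w.length ≤ number.length →
      (PySem.List.enumerate w (s : Int)).foldl
          (fun t p => t.insert p.2 (PySem.List.pyGetD number p.1 0)) t
        = (w.zip (number.drop s)).foldl (fun t p => t.insert p.1 p.2) t := by
  intro w
  induction w with
  | nil => intro s t _; simp [PySem.List.enumerate_nil]
  | cons x w ih =>
    intro s t h
    have hs : s < number.length := by simp at h; omega
    rw [PySem.List.enumerate_cons]
    have hdrop : number.drop s = number[s] :: number.drop (s + 1) :=
      List.drop_eq_getElem_cons hs
    rw [hdrop]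
    simp only [List.zip_cons_cons, List.foldl_cons]
    rw [PySem.List.pyGetD_natCast, List.getD_eq_getElem _ _ hs]
    have : ((s : Int) + 1) = ((s + 1 : Nat) : Int) := by push_cast; ring
    rw [this, ih (s + 1) _ (by simp at h ⊢; omega)]

-- the window B slices out is exactly A's sliding window after step i
theorem pv_slice_window (d : List String) (m : Nat) :
    PySem.List.slice d (some (max 0 ((m : Int) - 9))) (some ((m : Int) + 1))
      = (d.take (m + 1)).drop (m - 9) := by
  have h1 : max 0 ((m : Int) - 9) = ((m - 9 : Nat) : Int) := by
    by_cases h : m ≤ 9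
    · rw [max_eq_left (by omega)]; omega
    · rw [max_eq_right (by omega)]; omega
  have h2 : ((m : Int) + 1) = ((m + 1 : Nat) : Int) := by push_cast; ring
  rw [h1, h2, PySem.List.slice_natCast, List.drop_take]

-- the check dict after one full step of A's loop (increment, then possible eviction)
def pvC1 (c : PySem.Dict String Int) (x : String) : PySem.Dict String Int :=
  if c.contains x then c.modify x 0 (· + 1) else c.insert x 1

def pvC2 (d : List String) (m : Nat) (c : PySem.Dict String Int) (x : String) : PySem.Dict String Int :=
  if 10 ≤ (m : Int) then
    (if ((pvC1 c x).modify (PySem.List.pyGetD d ((m : Int) - 10) "") 0 (· - 1)).getD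
          (PySem.List.pyGetD d ((m : Int) - 10) "") 0 == 0
     then ((pvC1 c x).modify (PySem.List.pyGetD d ((m : Int) - 10) "") 0 (· - 1)).erase
          (PySem.List.pyGetD d ((m : Int) - 10) "")
     else (pvC1 c x).modify (PySem.List.pyGetD d ((m : Int) - 10) "") 0 (· - 1))
  else pvC1 c x

theorem pvStepA_eq (d : List String) (tg : PySem.Dict String Int) (a : Int)
    (c : PySem.Dict String Int) (m : Nat) (x : String) :
    pvStepA d tg (a, c) ((m : Int), x)
      = (a + (if pvDictEq (pvC2 d m c x) tg then 1 else 0), pvC2 d m c x) := rfl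

-- main loop lemma: A's fold from step m with a mapping-correct check equals B's fold
theorem pv_loop_eq (d : List String) (tg : PySem.Dict String Int) :
    ∀ (fuel m : Nat) (a : Int) (c : PySem.Dict String Int),
      m + fuel = d.length →
      (∀ key, c.get? key = (PySem.Dict.counter ((d.take m).drop (m - 10))).get? key) →
      ((PySem.List.enumerate (d.drop m) (m : Int)).foldl (pvStepA d tg) (a, c)).1
        = (List.range' m fuel).foldl
            (fun a i => a + (if pvDictEq (pvWindowCnt d i) tg then 1 else 0)) a := by
  intro fuel
  induction fuel with
  | zero =>
    intro m a c hlen _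
    have : d.drop m = [] := List.drop_eq_nil_of_le (by omega)
    simp [this, PySem.List.enumerate_nil]
  | succ fuel ih =>
    intro m a c hlen hinv
    have hm : m < d.length := by omega
    -- peel one element off both folds
    have hdrop : d.drop m = d[m] :: d.drop (m + 1) := List.drop_eq_getElem_cons hm
    rw [hdrop, PySem.List.enumerate_cons, List.range'_succ, List.foldl_cons, List.foldl_cons,
      pvStepA_eq]
    -- the window after this step
    set x := d[m] with hx
    set L2 := (d.take (m + 1)).drop (m - 9) with hL2
    have hF1 : (d.take m).drop (m - 10) ++ [x] = (d.take (m + 1)).drop (m - 10) := by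
      rw [hx, ← List.take_concat_get' d m hm,
        List.drop_append_of_le_length (by simp [List.length_take]; omega)]
    -- check after the increment, pointwise
    have hc1 : ∀ key, (pvC1 c x).get? key
          = (PySem.Dict.counter ((d.take m).drop (m - 10) ++ [x])).get? key := by
      intro key
      rw [PySem.Dict.counter_append_singleton, pv_get?_modify, pvC1]
      by_cases hk : key = x
      · rw [if_pos hk]
        by_cases hcx : c.contains x
        · rw [if_pos hcx, pv_get?_modify, if_pos hk]
          have hgd : c.getD x 0 = (PySem.Dict.counter ((d.take m).drop (m - 10))).getD x 0 := by
            rw [PySem.Dict.getD_eq_get?_getD, PySem.Dict.getD_eq_get?_getD, hinv x]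
          rw [hgd]
        · rw [if_neg hcx, PySem.Dict.get?_insert, if_pos hk]
          have h0 : c.get? x = none :=
            (PySem.Dict.get?_eq_none_iff_contains _ _).mpr (by simpa using hcx)
          have hgd : (PySem.Dict.counter ((d.take m).drop (m - 10))).getD x 0 = 0 := by
            rw [PySem.Dict.getD_eq_get?_getD, ← hinv x, h0]; rfl
          rw [hgd]
          norm_num
      · rw [if_neg hk]
        by_cases hcx : c.contains x
        · rw [if_pos hcx, pv_get?_modify, if_neg hk, hinv key]
        · rw [if_neg hcx, PySem.Dict.get?_insert, if_neg hk, hinv key]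
    -- check after the (possible) eviction, pointwise against counter L2
    have hstep : ∀ key, (pvC2 d m c x).get? key = (PySem.Dict.counter L2).get? key := by
      intro key
      rw [pvC2]
      by_cases h10 : 10 ≤ m
      · rw [if_pos (by exact_mod_cast h10)]
        have hidx : ((m : Int) - 10) = ((m - 10 : Nat) : Int) := by omega
        have hn : PySem.List.pyGetD d ((m : Int) - 10) "" = d[m - 10] := by
          rw [hidx, PySem.List.pyGetD_natCast, List.getD_eq_getElem _ _ (by omega)]
        have hcons : (d.take m).drop (m - 10) ++ [x] = d[m - 10] :: L2 := by
          rw [hF1, List.drop_eq_getElem_cons (l := d.take (m + 1))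
            (by simp [List.length_take]; omega), List.getElem_take]
          have : m - 10 + 1 = m - 9 := by omega
          rw [this]
        have hc1n : (pvC1 c x).getD d[m - 10] 0 = (L2.count d[m - 10] : Int) + 1 := by
          rw [PySem.Dict.getD_eq_get?_getD, hc1 d[m - 10], hcons, pv_get?_counter]
          simp [List.count_cons_self]
        have hgetc' : ∀ k', ((pvC1 c x).modify d[m - 10] 0 (· - 1)).get? k'
            = if k' = d[m - 10] then some ((L2.count d[m - 10] : Int))
              else (PySem.Dict.counter L2).get? k' := by
          intro k'
          rw [pv_get?_modify]
          by_cases hk' : k' = d[m - 10]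
          · rw [if_pos hk', if_pos hk', hc1n]; ring_nf
          · rw [if_neg hk', if_neg hk', hc1 k', hcons, pv_get?_counter, pv_get?_counter]
            have hne : ¬d[m - 10] = k' := fun h => hk' h.symm
            simp [hne]
        rw [hn]
        by_cases hz : L2.count d[m - 10] = 0
        · rw [if_pos (by rw [PySem.Dict.getD_eq_get?_getD, hgetc' d[m - 10], if_pos rfl]; simp [hz]),
            pv_get?_erase]
          by_cases hk : key = d[m - 10]
          · rw [if_pos hk, hk, pv_get?_counter, if_pos hz]
          · rw [if_neg hk, hgetc' key, if_neg hk]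
        · rw [if_neg (by rw [PySem.Dict.getD_eq_get?_getD, (hgetc' d[m - 10]), if_pos rfl]; simp; exact_mod_cast hz), hgetc' key]
          by_cases hk : key = d[m - 10]
          · rw [if_pos hk, hk, pv_get?_counter, if_neg hz]
          · rw [if_neg hk]
      · rw [if_neg (by exact_mod_cast h10)]
        have hL2' : (d.take m).drop (m - 10) ++ [x] = L2 := by
          rw [hF1, hL2]
          have h10' : m - 10 = 0 := by omega
          have h9 : m - 9 = 0 := by omega
          rw [h10', h9]
        rw [hc1 key, hL2']
    -- B's window count is the counter of the same window
    have hwin : pvDictEq (pvWindowCnt d m) tg = pvDictEq (PySem.Dict.counter L2) tg := by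
      rw [pvWindowCnt, PySem.Dict.foldl_insert_getD_add_one_eq_counter, pv_slice_window d m]
    have hbit : (if pvDictEq (pvC2 d m c x) tg then (1 : Int) else 0)
        = (if pvDictEq (pvWindowCnt d m) tg then 1 else 0) := by
      rw [hwin, pvDictEq_congr _ _ tg hstep]
    rw [hbit]
    have hcast : ((m : Int) + 1) = ((m + 1 : Nat) : Int) := by push_cast; ring
    rw [hcast, ih (m + 1) _ _ (by omega) (by
      intro key
      have h9 : m + 1 - 10 = m - 9 := by omega
      rw [h9, ← hL2]
      exact hstep key)]

-- ===== VERDICT (by name: the statement is the Claim_ definition above) =====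
theorem solution_spec : Claim_equal_solution := by
  intro want number discount _ hpre
  show solution want number discount = solution_alt want number discount
  have h1 : solution want number discount
      = ((PySem.List.enumerate discount 0).foldl
          (pvStepA discount ((PySem.List.enumerate want 0).foldl
            (fun t p => t.insert p.2 (PySem.List.pyGetD number p.1 0)) PySem.Dict.empty))
          (0, PySem.Dict.empty)).1 := rfl
  have h2 : solution_alt want number discount
      = (List.range discount.length).foldl
          (fun a i => a + (if pvDictEq (pvWindowCnt discount i)
            ((want.zip number).foldl (fun t p => t.insert p.1 p.2) PySem.Dict.empty) then 1 else 0)) 0 := rfl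
  have ht := pv_target_eq number want 0 PySem.Dict.empty (by simpa using hpre)
  rw [Nat.cast_zero] at ht
  rw [h1, h2, ht]
  simp only [List.drop_zero]
  rw [List.range_eq_range']
  have h3 := pv_loop_eq discount
      ((want.zip number).foldl (fun t p => t.insert p.1 p.2) PySem.Dict.empty)
      discount.length 0 0 PySem.Dict.empty (by omega)
      (by intro key; simp [PySem.Dict.get?, PySem.Dict.counter, PySem.Dict.empty])
  simpa using h3
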